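-- pv_equiv track=rewrite | github.com/SlawomirMiszkurka/pp1 | 09-Test2/zad3.py | f
-- ===== SOURCE A (Python) =====
-- def f(array2D):
--     i=0
--     arr=[]
--     while i<len(array2D[0]):
--         count=0
--         for j in array2D:
--             count+=j[i]
--         arr.append(count)
--         i+=1
--     max=arr[0]
--     for i in arr:
--         if i>max:
--             max=i
--     return arr.index(max)
-- ===== SOURCE B (Python) =====
-- def f(array2D):
--     best = 0
--     for row in array2D:
--         best += row[0]
--     best_idx = 0
--     for i in range(1, len(array2D[0])):
--         s = 0
--         for row in array2D:
--             s += row[i]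
--         if s > best:
--             best, best_idx = s, i
--     return best_idx
-- ===== Notes on version B (the rewrite author's own statement) =====
-- stated objective: simpler
-- what changed: B tracks the running maximum column sum and its first index in a single pass over column indices, instead of building the full list of column sums, folding for the maximum, and then rescanning with list.index.
import Mathlib
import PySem

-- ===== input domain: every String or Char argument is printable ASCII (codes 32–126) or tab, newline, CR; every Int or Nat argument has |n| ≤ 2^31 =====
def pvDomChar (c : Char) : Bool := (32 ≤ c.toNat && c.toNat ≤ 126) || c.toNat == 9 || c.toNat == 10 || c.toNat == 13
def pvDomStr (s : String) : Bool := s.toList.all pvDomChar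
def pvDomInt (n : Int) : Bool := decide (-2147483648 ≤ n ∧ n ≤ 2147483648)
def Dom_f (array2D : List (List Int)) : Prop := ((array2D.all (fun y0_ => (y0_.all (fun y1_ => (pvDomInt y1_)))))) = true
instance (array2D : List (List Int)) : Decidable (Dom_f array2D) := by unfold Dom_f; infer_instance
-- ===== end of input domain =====

-- B replaces A's build-all-column-sums / fold-for-max / rescan-with-index pipeline by a
-- single pass over column indices tracking the running maximum sum and its first index.


-- ===== PORT A =====
-- while i < len(array2D[0]): build arr of column sums; fold for max; arr.index(max).
-- pyGetD with default 0 stands for j[i]; Pre_f confines i to be in range for every row.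
def f (array2D : List (List Int)) : Int :=
  let arr := (PySem.List.pyRange 0 ((array2D.headD []).length : Int) 1).map
    (fun i => array2D.foldl (fun count j => count + PySem.List.pyGetD j i 0) 0)
  let m := arr.foldl (fun m x => if x > m then x else m) (arr.headD 0)
  (((PySem.List.index? arr m).getD 0 : Nat) : Int)

-- ===== PORT B =====
-- single pass: best = sum of column 0, then for i in range(1, len(array2D[0]))
-- update (best, best_idx) when the column sum strictly exceeds best.
def f_alt (array2D : List (List Int)) : Int :=
  let best0 := array2D.foldl (fun s row => s + PySem.List.pyGetD row 0 0) 0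
  let st := (PySem.List.pyRange 1 ((array2D.headD []).length : Int) 1).foldl
    (fun (p : Int × Int) i =>
      let s := array2D.foldl (fun s row => s + PySem.List.pyGetD row i 0) 0
      if s > p.1 then (s, i) else p) (best0, 0)
  st.2

-- ===== PRECONDITION & SPEC =====
-- Pre_f excludes exactly the inputs where Python A raises IndexError: an empty matrix,
-- an empty first row, or a row shorter than the first row.
def Pre_f (array2D : List (List Int)) : Prop :=
  array2D ≠ [] ∧ (array2D.headD []) ≠ [] ∧
    ∀ row ∈ array2D, (array2D.headD []).length ≤ row.length
instance (array2D : List (List Int)) : Decidable (Pre_f array2D) := by unfold Pre_f; infer_instance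
def pvWitness_f : List (List Int) := [[1, 2], [3, 0]]
def Spec_f (array2D : List (List Int)) (out : Int) : Prop := out = f_alt array2D
instance (array2D : List (List Int)) (out : Int) : Decidable (Spec_f array2D out) := by unfold Spec_f; infer_instance

-- ===== CLAIM (what is proved, stated in full; the proofs are below) =====
def Claim_equal_f : Prop := ∀ (array2D : List (List Int)), Dom_f array2D → Pre_f array2D → Spec_f array2D (f array2D)

-- ===== LEMMAS AND PROOFS =====

/-- fst of B's pair fold is the plain running-max fold over the same list. -/
lemma fold_fst (g : Int → Int) (l : List Int) (p : Int × Int) :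
    (l.foldl (fun (p : Int × Int) i => if g i > p.1 then (g i, i) else p) p).1
      = l.foldl (fun m i => if g i > m then g i else m) p.1 := by
  induction l generalizing p with
  | nil => rfl
  | cons x t ih =>
      simp only [List.foldl]
      by_cases h : g x > p.1 <;> simp [h, ih]

/-- Invariant of B's single-pass fold: after processing range(1, n), the state holds the
    maximum of g over [0, n) and the least index attaining it. -/
lemma inv (g : Int → Int) (n : Int) (hn : 1 ≤ n) :
    ∃ b j, (PySem.List.pyRange 1 n 1).foldl
        (fun (p : Int × Int) i => if g i > p.1 then (g i, i) else p) (g 0, 0) = (b, j) ∧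
      0 ≤ j ∧ j < n ∧ g j = b ∧
      (∀ x, 0 ≤ x → x < j → g x < b) ∧ (∀ x, 0 ≤ x → x < n → g x ≤ b) := by
  induction n, hn using Int.le_induction with
  | base =>
      refine ⟨g 0, 0, ?_, le_refl 0, by omega, rfl, by omega, ?_⟩
      · rw [PySem.List.pyRange_one_eq_nil (le_refl 1)]
        rfl
      · intro x hx hx1
        have hx0 : x = 0 := by omega
        rw [hx0]
  | succ n hn1 ih =>
      obtain ⟨b, j, heq, h0, h1, h2, h3, h4⟩ := ih
      rw [PySem.List.pyRange_one_succ_right (by omega : (1:Int) ≤ n), List.foldl_append, heq]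
      simp only [List.foldl_cons, List.foldl_nil]
      by_cases h : g n > b
      · refine ⟨g n, n, by rw [if_pos h], by omega, by omega, rfl, ?_, ?_⟩
        · intro x hx hxn
          exact lt_of_le_of_lt (h4 x hx hxn) h
        · intro x hx hxn
          by_cases hx' : x < n
          · exact le_of_lt (lt_of_le_of_lt (h4 x hx hx') h)
          · have hxe : x = n := by omega
            rw [hxe]
      · refine ⟨b, j, by rw [if_neg h], h0, by omega, h2, h3, ?_⟩
        intro x hx hxn
        by_cases hx' : x < n
        · exact h4 x hx hx'
        · have hxe : x = n := by omega
          rw [hxe]; omega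

/-- The core argmax lemma: A's list-then-index pipeline equals B's single pass. -/
lemma argmax_eq (g : Int → Int) (n : Int) (hn : 1 ≤ n) :
    ((((PySem.List.index? ((PySem.List.pyRange 0 n 1).map g)
        (((PySem.List.pyRange 0 n 1).map g).foldl (fun m x => if x > m then x else m)
          (((PySem.List.pyRange 0 n 1).map g).headD 0))).getD 0 : Nat)) : Int)
      = ((PySem.List.pyRange 1 n 1).foldl
          (fun (p : Int × Int) i => if g i > p.1 then (g i, i) else p) (g 0, 0)).2 := by
  obtain ⟨b, j, heq, h0, h1, h2, h3, h4⟩ := inv g n hn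
  rw [heq]
  set arr := (PySem.List.pyRange 0 n 1).map g with harr
  have hcons : arr = g 0 :: (PySem.List.pyRange 1 n 1).map g := by
    rw [harr, PySem.List.pyRange_one_cons (by omega : (0:Int) < n), List.map_cons]
    norm_num
  -- the running max equals b
  have hf := fold_fst g (PySem.List.pyRange 1 n 1) (g 0, 0)
  rw [heq] at hf
  have hmax : arr.foldl (fun m x => if x > m then x else m) (arr.headD 0) = b := by
    rw [hcons]
    simp only [List.headD_cons, List.foldl_cons, gt_iff_lt, lt_irrefl, if_false, List.foldl_map]
    simp only [gt_iff_lt] at hf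
    exact hf.symm.trans rfl
  have hlen : arr.length = n.toNat := by
    simp [harr, PySem.List.length_pyRange_one]
  have hget : ∀ (t : Nat) (ht : t < arr.length), arr[t] = g t := by
    intro t ht
    have ht' : t < (PySem.List.pyRange 0 n 1).length := by
      simpa [harr] using ht
    simp [harr, PySem.List.getElem_pyRange_one]
  have hk : j.toNat < arr.length := by
    rw [hlen]; omega
  have hjk : ((j.toNat : Int)) = j := Int.toNat_of_nonneg h0
  have hik : PySem.List.index? arr b = some j.toNat := by
    rw [PySem.List.index?_eq_some_iff]
    refine ⟨arr.take j.toNat, arr.drop (j.toNat + 1), ?_, ?_, ?_⟩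
    · have hsplit : arr.take j.toNat ++ arr[j.toNat] :: arr.drop (j.toNat + 1) = arr := by
        rw [List.getElem_cons_drop, List.take_append_drop]
      have hv : arr[j.toNat] = b := by
        rw [hget j.toNat hk, hjk, h2]
      rw [hv] at hsplit
      exact hsplit.symm
    · rw [List.length_take]
      omega
    · intro hmem
      rw [List.mem_iff_getElem] at hmem
      obtain ⟨i, hi, hiv⟩ := hmem
      have hi' : i < j.toNat := by
        rw [List.length_take] at hi
        omega
      have hia : i < arr.length := by omega
      rw [List.getElem_take, hget i hia] at hiv
      have hlt := h3 i (by omega) (by omega)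
      omega
  rw [hmax, hik, Option.getD_some, hjk]

-- ===== VERDICT (by name: the statement is the Claim_ definition above) =====
theorem f_spec : Claim_equal_f := by
  intro a _ hpre
  obtain ⟨hne, hrow, _⟩ := hpre
  show f a = f_alt a
  unfold f f_alt
  have hn : (1 : Int) ≤ ((a.headD []).length : Int) := by
    have : (a.headD []).length ≠ 0 := by
      intro h
      exact hrow (List.eq_nil_of_length_eq_zero h)
    omega
  exact argmax_eq (fun i => a.foldl (fun count j => count + PySem.List.pyGetD j i 0) 0)
    ((a.headD []).length : Int) hn
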